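-- pv_equiv track=rewrite | github.com/dmonack/Advent-of-Code-2024 | 21.py | convert
-- ===== SOURCE A (Python) =====
-- numeric_pad = {'0': (0, 1), 'A': (0, 2),
--                '1': (1, 0), '2': (1, 1), '3': (1, 2),
--                '4': (2, 0), '5': (2, 1), '6': (2, 2),
--                '7': (3, 0), '8': (3, 1), '9': (3, 2)}
--
-- def numeric_to_arrows(prev: str, next: str) -> list[str]:
--     '''Converts keypresses to list of possible arrow presses.'''
--     prev_y, prev_x = numeric_pad[prev]
--     next_y, next_x = numeric_pad[next]
--
--     if prev_x == 0 and next_y == 0: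
--         return ['>' * (next_x - prev_x) + 'v' * (prev_y - next_y) + 'A']
--
--     if prev_y == 0 and next_x == 0:
--         return ['^' * (next_y - prev_y) + '<' * (prev_x - next_x) + 'A']
--
--     if next_x > prev_x:
--         horizontal = '>' * (next_x - prev_x)
--     else:
--         horizontal = '<' * (prev_x - next_x)
--
--     if next_y > prev_y:
--         vertical = '^' * (next_y - prev_y)
--     else:
--         vertical = 'v' * (prev_y - next_y)
--
--     if not horizontal:
--         return [vertical + 'A']
--
--     if not vertical:
--         return [horizontal + 'A']
--
--     return [horizontal + vertical + 'A', vertical + horizontal + 'A']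
--
-- def convert(s: str) -> list[str]:
--     '''Converts a code to string of arrow presses.'''
--
--     result = []
--     prev = 'A'
--     for c in s:
--         section = numeric_to_arrows(prev, c)
--         section.sort(key = len)
--         result.append(section[0])
--         prev = c
--
--     return result
-- ===== SOURCE B (Python) =====
-- # Table-driven: one precomputed shortest-arrow-path per keypad transition; convert is pure lookups.
-- PATHS = {
--     ('0', '0'): 'A', ('0', '1'): '^<A', ('0', '2'): '^A', ('0', '3'): '>^A', ('0', '4'): '^^<A',
--     ('0', '5'): '^^A', ('0', '6'): '>^^A', ('0', '7'): '^^^<A', ('0', '8'): '^^^A', ('0', '9'): '>^^^A',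
--     ('0', 'A'): '>A', ('1', '0'): '>vA', ('1', '1'): 'A', ('1', '2'): '>A', ('1', '3'): '>>A',
--     ('1', '4'): '^A', ('1', '5'): '>^A', ('1', '6'): '>>^A', ('1', '7'): '^^A', ('1', '8'): '>^^A',
--     ('1', '9'): '>>^^A', ('1', 'A'): '>>vA', ('2', '0'): 'vA', ('2', '1'): '<A', ('2', '2'): 'A',
--     ('2', '3'): '>A', ('2', '4'): '<^A', ('2', '5'): '^A', ('2', '6'): '>^A', ('2', '7'): '<^^A',
--     ('2', '8'): '^^A', ('2', '9'): '>^^A', ('2', 'A'): '>vA', ('3', '0'): '<vA', ('3', '1'): '<<A',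
--     ('3', '2'): '<A', ('3', '3'): 'A', ('3', '4'): '<<^A', ('3', '5'): '<^A', ('3', '6'): '^A',
--     ('3', '7'): '<<^^A', ('3', '8'): '<^^A', ('3', '9'): '^^A', ('3', 'A'): 'vA', ('4', '0'): '>vvA',
--     ('4', '1'): 'vA', ('4', '2'): '>vA', ('4', '3'): '>>vA', ('4', '4'): 'A', ('4', '5'): '>A',
--     ('4', '6'): '>>A', ('4', '7'): '^A', ('4', '8'): '>^A', ('4', '9'): '>>^A', ('4', 'A'): '>>vvA',
--     ('5', '0'): 'vvA', ('5', '1'): '<vA', ('5', '2'): 'vA', ('5', '3'): '>vA', ('5', '4'): '<A',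
--     ('5', '5'): 'A', ('5', '6'): '>A', ('5', '7'): '<^A', ('5', '8'): '^A', ('5', '9'): '>^A',
--     ('5', 'A'): '>vvA', ('6', '0'): '<vvA', ('6', '1'): '<<vA', ('6', '2'): '<vA', ('6', '3'): 'vA',
--     ('6', '4'): '<<A', ('6', '5'): '<A', ('6', '6'): 'A', ('6', '7'): '<<^A', ('6', '8'): '<^A',
--     ('6', '9'): '^A', ('6', 'A'): 'vvA', ('7', '0'): '>vvvA', ('7', '1'): 'vvA', ('7', '2'): '>vvA',
--     ('7', '3'): '>>vvA', ('7', '4'): 'vA', ('7', '5'): '>vA', ('7', '6'): '>>vA', ('7', '7'): 'A',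
--     ('7', '8'): '>A', ('7', '9'): '>>A', ('7', 'A'): '>>vvvA', ('8', '0'): 'vvvA', ('8', '1'): '<vvA',
--     ('8', '2'): 'vvA', ('8', '3'): '>vvA', ('8', '4'): '<vA', ('8', '5'): 'vA', ('8', '6'): '>vA',
--     ('8', '7'): '<A', ('8', '8'): 'A', ('8', '9'): '>A', ('8', 'A'): '>vvvA', ('9', '0'): '<vvvA',
--     ('9', '1'): '<<vvA', ('9', '2'): '<vvA', ('9', '3'): 'vvA', ('9', '4'): '<<vA', ('9', '5'): '<vA',
--     ('9', '6'): 'vA', ('9', '7'): '<<A', ('9', '8'): '<A', ('9', '9'): 'A', ('9', 'A'): 'vvvA',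
--     ('A', '0'): '<A', ('A', '1'): '^<<A', ('A', '2'): '<^A', ('A', '3'): '^A', ('A', '4'): '^^<<A',
--     ('A', '5'): '<^^A', ('A', '6'): '^^A', ('A', '7'): '^^^<<A', ('A', '8'): '<^^^A', ('A', '9'): '^^^A',
--     ('A', 'A'): 'A'
-- }
--
-- def convert(s: str) -> list[str]:
--     '''Converts a code to string of arrow presses.'''
--     return [PATHS[p, c] for p, c in zip('A' + s, s)]
-- ===== Notes on version B (the rewrite author's own statement) =====
-- stated objective: alternative
-- what changed: B replaces A's per-character coordinate arithmetic, gap special-cases and sort-by-length pick with a single precomputed 121-entry transition table (prev/next key pair -> arrow string), so convert is pure dictionary lookups over each character paired with its predecessor.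
import Mathlib
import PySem

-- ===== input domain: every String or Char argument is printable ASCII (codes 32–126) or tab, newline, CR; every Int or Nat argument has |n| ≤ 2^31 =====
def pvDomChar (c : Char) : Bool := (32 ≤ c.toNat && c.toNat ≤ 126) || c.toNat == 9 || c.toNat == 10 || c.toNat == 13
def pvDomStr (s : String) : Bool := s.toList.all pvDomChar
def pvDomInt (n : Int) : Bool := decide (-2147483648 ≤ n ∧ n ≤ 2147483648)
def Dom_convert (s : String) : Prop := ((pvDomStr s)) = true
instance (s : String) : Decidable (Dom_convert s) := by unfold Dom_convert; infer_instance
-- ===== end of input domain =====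

-- B is table-driven: a precomputed 121-entry transition table replaces A's per-char coordinate
-- arithmetic, gap special-cases and sort-by-length pick; convert is pure lookups. Same cost.

-- ===== PORT A =====
-- numeric_pad (module constant)
def numericPadA : PySem.Dict Char (Int × Int) :=
  PySem.Dict.ofList [('0',(0,1)),('A',(0,2)),('1',(1,0)),('2',(1,1)),('3',(1,2)),
                     ('4',(2,0)),('5',(2,1)),('6',(2,2)),('7',(3,0)),('8',(3,1)),('9',(3,2))]

-- '>' * n for Int n (negative → empty), as Python's string repetition
def repA (c : Char) (n : Int) : List Char := List.replicate n.toNat c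

-- numeric_to_arrows; none = KeyError on numeric_pad lookup
def numericToArrowsA (prev next : Char) : Option (List String) :=
  match numericPadA.get? prev, numericPadA.get? next with
  | some (prevY, prevX), some (nextY, nextX) =>
    if prevX = 0 ∧ nextY = 0 then
      some [String.ofList (repA '>' (nextX - prevX) ++ repA 'v' (prevY - nextY) ++ ['A'])]
    else if prevY = 0 ∧ nextX = 0 then
      some [String.ofList (repA '^' (nextY - prevY) ++ repA '<' (prevX - nextX) ++ ['A'])]
    else
      let horizontal := if nextX > prevX then repA '>' (nextX - prevX) else repA '<' (prevX - nextX)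
      let vertical := if nextY > prevY then repA '^' (nextY - prevY) else repA 'v' (prevY - nextY)
      if horizontal = [] then some [String.ofList (vertical ++ ['A'])]
      else if vertical = [] then some [String.ofList (horizontal ++ vertical ++ ['A'])]
      else some [String.ofList (horizontal ++ vertical ++ ['A']), String.ofList (vertical ++ horizontal ++ ['A'])]
  | _, _ => none

-- loop body of convert: section = numeric_to_arrows(prev, c); section.sort(key=len); result.append(section[0])
def stepFoldA (st : List String × Char) (c : Char) : List String × Char :=
  match numericToArrowsA st.2 c with
  | some sec =>
    let sorted := PySem.List.sorted sec (fun t => PySem.Str.len t)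
    match PySem.List.pyGet? sorted 0 with
    | some x => (st.1 ++ [x], c)
    | none => (st.1, c)     -- unreachable in Python (section nonempty)
  | none => (st.1, c)       -- KeyError in Python; excluded by Pre_

def convert (s : String) : List String :=
  (s.toList.foldl stepFoldA ([], 'A')).1

-- ===== PORT B =====
-- PATHS: the precomputed transition table, keyed by the (prev, next) char pair
def pathsB : PySem.Dict (Char × Char) String :=
  PySem.Dict.ofList
    [(('0','0'),"A"),
     (('0','1'),"^<A"),
     (('0','2'),"^A"),
     (('0','3'),">^A"),
     (('0','4'),"^^<A"),
     (('0','5'),"^^A"),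
     (('0','6'),">^^A"),
     (('0','7'),"^^^<A"),
     (('0','8'),"^^^A"),
     (('0','9'),">^^^A"),
     (('0','A'),">A"),
     (('1','0'),">vA"),
     (('1','1'),"A"),
     (('1','2'),">A"),
     (('1','3'),">>A"),
     (('1','4'),"^A"),
     (('1','5'),">^A"),
     (('1','6'),">>^A"),
     (('1','7'),"^^A"),
     (('1','8'),">^^A"),
     (('1','9'),">>^^A"),
     (('1','A'),">>vA"),
     (('2','0'),"vA"),
     (('2','1'),"<A"),
     (('2','2'),"A"),
     (('2','3'),">A"),
     (('2','4'),"<^A"),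
     (('2','5'),"^A"),
     (('2','6'),">^A"),
     (('2','7'),"<^^A"),
     (('2','8'),"^^A"),
     (('2','9'),">^^A"),
     (('2','A'),">vA"),
     (('3','0'),"<vA"),
     (('3','1'),"<<A"),
     (('3','2'),"<A"),
     (('3','3'),"A"),
     (('3','4'),"<<^A"),
     (('3','5'),"<^A"),
     (('3','6'),"^A"),
     (('3','7'),"<<^^A"),
     (('3','8'),"<^^A"),
     (('3','9'),"^^A"),
     (('3','A'),"vA"),
     (('4','0'),">vvA"),
     (('4','1'),"vA"),
     (('4','2'),">vA"),
     (('4','3'),">>vA"),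
     (('4','4'),"A"),
     (('4','5'),">A"),
     (('4','6'),">>A"),
     (('4','7'),"^A"),
     (('4','8'),">^A"),
     (('4','9'),">>^A"),
     (('4','A'),">>vvA"),
     (('5','0'),"vvA"),
     (('5','1'),"<vA"),
     (('5','2'),"vA"),
     (('5','3'),">vA"),
     (('5','4'),"<A"),
     (('5','5'),"A"),
     (('5','6'),">A"),
     (('5','7'),"<^A"),
     (('5','8'),"^A"),
     (('5','9'),">^A"),
     (('5','A'),">vvA"),
     (('6','0'),"<vvA"),
     (('6','1'),"<<vA"),
     (('6','2'),"<vA"),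
     (('6','3'),"vA"),
     (('6','4'),"<<A"),
     (('6','5'),"<A"),
     (('6','6'),"A"),
     (('6','7'),"<<^A"),
     (('6','8'),"<^A"),
     (('6','9'),"^A"),
     (('6','A'),"vvA"),
     (('7','0'),">vvvA"),
     (('7','1'),"vvA"),
     (('7','2'),">vvA"),
     (('7','3'),">>vvA"),
     (('7','4'),"vA"),
     (('7','5'),">vA"),
     (('7','6'),">>vA"),
     (('7','7'),"A"),
     (('7','8'),">A"),
     (('7','9'),">>A"),
     (('7','A'),">>vvvA"),
     (('8','0'),"vvvA"),
     (('8','1'),"<vvA"),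
     (('8','2'),"vvA"),
     (('8','3'),">vvA"),
     (('8','4'),"<vA"),
     (('8','5'),"vA"),
     (('8','6'),">vA"),
     (('8','7'),"<A"),
     (('8','8'),"A"),
     (('8','9'),">A"),
     (('8','A'),">vvvA"),
     (('9','0'),"<vvvA"),
     (('9','1'),"<<vvA"),
     (('9','2'),"<vvA"),
     (('9','3'),"vvA"),
     (('9','4'),"<<vA"),
     (('9','5'),"<vA"),
     (('9','6'),"vA"),
     (('9','7'),"<<A"),
     (('9','8'),"<A"),
     (('9','9'),"A"),
     (('9','A'),"vvvA"),
     (('A','0'),"<A"),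
     (('A','1'),"^<<A"),
     (('A','2'),"<^A"),
     (('A','3'),"^A"),
     (('A','4'),"^^<<A"),
     (('A','5'),"<^^A"),
     (('A','6'),"^^A"),
     (('A','7'),"^^^<<A"),
     (('A','8'),"<^^^A"),
     (('A','9'),"^^^A"),
     (('A','A'),"A")]

-- convert: [PATHS[p + c] for p, c in zip('A' + s, s)]; missing key (KeyError) → ""
def convert_alt (s : String) : List String :=
  ((("A" ++ s).toList.zip s.toList).map
    (fun pc => (pathsB.get? (pc.1, pc.2)).getD ""))

-- ===== PRECONDITION & SPEC =====
def keypadChars : List Char := ['0','1','2','3','4','5','6','7','8','9','A']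

-- Pre_ excludes exactly the inputs containing a char outside the numeric keypad, on which A raises KeyError.
def Pre_convert (s : String) : Prop := (s.toList.all (fun c => keypadChars.contains c)) = true
instance (s : String) : Decidable (Pre_convert s) := by unfold Pre_convert; infer_instance
def pvWitness_convert : String := "029A"

def Spec_convert (s : String) (out : List String) : Prop := out = convert_alt s
instance (s : String) (out : List String) : Decidable (Spec_convert s out) := by unfold Spec_convert; infer_instance

-- ===== CLAIM (what is proved, stated in full; the proofs are below) =====
def Claim_equal_convert : Prop := ∀ (s : String), Dom_convert s → Pre_convert s → Spec_convert s (convert s)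

-- ===== LEMMAS AND PROOFS =====

-- A's loop body only appends to the accumulator (second component becomes c)
theorem stepFoldA_shift (r : List String) (p c : Char) :
    stepFoldA (r, p) c = (r ++ (stepFoldA ([], p) c).1, c) := by
  unfold stepFoldA
  rcases hm : numericToArrowsA p c with _ | sec
  · simp
  · simp only
    rcases hg : PySem.List.pyGet? (PySem.List.sorted sec (fun t => PySem.Str.len t)) 0 with _ | x
    · simp
    · simp

-- on keypad chars, A's per-transition step appends exactly B's table entry
-- the per-transition agreement, as one kernel-checked table computation
set_option maxRecDepth 8192 in
theorem step_agree_bool :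
    (keypadChars.all fun p => keypadChars.all fun c =>
      decide ((stepFoldA ([], p) c).1 = [(pathsB.get? (p, c)).getD ""])) = true := by
  decide

theorem step_agree : ∀ p ∈ keypadChars, ∀ c ∈ keypadChars,
    (stepFoldA ([], p) c).1 = [(pathsB.get? (p, c)).getD ""] := by
  intro p hp c hc
  have h := step_agree_bool
  rw [List.all_eq_true] at h
  have h2 := h p hp
  rw [List.all_eq_true] at h2
  exact of_decide_eq_true (h2 c hc)

theorem loop_eq (l : List Char) : ∀ (p : Char) (r : List String),
    p ∈ keypadChars → (∀ c ∈ l, c ∈ keypadChars) →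
    (l.foldl stepFoldA (r, p)).1 =
      r ++ ((p :: l).zip l).map (fun pc => (pathsB.get? (pc.1, pc.2)).getD "") := by
  induction l with
  | nil => intro p r _ _; simp
  | cons c t ih =>
    intro p r hp hall
    have hc : c ∈ keypadChars := hall c (by simp)
    have ht : ∀ x ∈ t, x ∈ keypadChars := fun x hx => hall x (by simp [hx])
    rw [List.foldl_cons, stepFoldA_shift r p c, step_agree p hp c hc]
    rw [ih c (r ++ [(pathsB.get? (p, c)).getD ""]) hc ht]
    simp [List.zip]

theorem toList_A_append (s : String) : ("A" ++ s).toList = 'A' :: s.toList := by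
  simp

-- ===== VERDICT (by name: the statement is the Claim_ definition above) =====
theorem convert_spec : Claim_equal_convert := by
  intro s _ hpre
  unfold Pre_convert at hpre
  rw [List.all_eq_true] at hpre
  replace hpre : ∀ c ∈ s.toList, c ∈ keypadChars := fun c hc => by
    simpa using hpre c hc
  unfold Spec_convert convert convert_alt
  rw [toList_A_append, loop_eq s.toList 'A' [] (by decide) hpre]
  simp
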